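-- pv_equiv track=rewrite | github.com/ghanshyam9009/INVOICE_CAMERA | backend/models/ocr.py | format_text_for_invoice
-- ===== SOURCE A (Python) =====
-- def format_text_for_invoice(text_lines):
--     """Format extracted text lines for invoice layout."""
--     # Sort text lines by their vertical and then horizontal position
--     text_lines.sort(key=lambda x: (x[2], x[1]))
--     formatted_text = []
--     current_line = []
--     last_top = None
--
--     for text, left, top, _, _ in text_lines:
--         if last_top is not None and abs(top - last_top) > 20:  # Significant gap, start a new line
--             formatted_text.append(" ".join(current_line))
--             current_line = []
--
--         current_line.append(text)
--         last_top = top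
--
--     if current_line:
--         formatted_text.append(" ".join(current_line))
--
--     return "\n".join(formatted_text)
-- ===== SOURCE B (Python) =====
-- def format_text_for_invoice(text_lines):
--     """Format extracted text lines for invoice layout."""
--     # Same in-place sort as A (mutates the argument).
--     text_lines.sort(key=lambda x: (x[2], x[1]))
--     texts = [x[0] for x in text_lines]
--     tops = [x[2] for x in text_lines]
--     seps = ["\n" if abs(b - a) > 20 else " " for a, b in zip(tops, tops[1:])]
--     return "".join(texts[:1] + [s + t for s, t in zip(seps, texts[1:])])
-- ===== Notes on version B (the rewrite author's own statement) =====
-- stated objective: alternative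
-- what changed: B replaces A's stateful grouping pass (current_line/formatted_text lists, last_top, two joins) by stateless staged passes: extract the text and top columns, compute a separator list by zipping adjacent tops, and interleave separators with texts in a single ''.join.
import Mathlib
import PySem

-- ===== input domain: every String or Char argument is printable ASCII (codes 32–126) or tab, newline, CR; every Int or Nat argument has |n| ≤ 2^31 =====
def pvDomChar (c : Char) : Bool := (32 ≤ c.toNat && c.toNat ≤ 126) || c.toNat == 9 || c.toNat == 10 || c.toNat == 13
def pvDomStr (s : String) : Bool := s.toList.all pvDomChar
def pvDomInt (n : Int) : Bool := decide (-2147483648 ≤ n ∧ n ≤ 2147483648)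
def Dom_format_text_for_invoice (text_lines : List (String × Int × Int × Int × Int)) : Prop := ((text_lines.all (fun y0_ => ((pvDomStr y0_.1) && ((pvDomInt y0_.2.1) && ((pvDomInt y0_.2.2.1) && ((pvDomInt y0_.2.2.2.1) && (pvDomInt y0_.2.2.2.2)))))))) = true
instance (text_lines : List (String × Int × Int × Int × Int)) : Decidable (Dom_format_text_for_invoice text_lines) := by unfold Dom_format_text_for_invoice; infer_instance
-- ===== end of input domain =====

-- B replaces A's stateful grouping pass by stateless staged passes (extract columns, zip adjacent
-- tops into a separator list, interleave with one join); objective: alternative. Both Pythons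
-- mutate the argument via the same in-place .sort(); the equivalence proved is about the RETURN value.

-- ===== PORT A =====
-- loop body of A's for-loop: state = (formatted_text, current_line, last_top)
def pvStepA (acc : List String × List String × Option Int)
    (x : String × Int × Int × Int × Int) : List String × List String × Option Int :=
  let acc' :=
    match acc.2.2 with
    | some l =>
        if |x.2.2.1 - l| > 20 then (acc.1 ++ [PySem.Str.join " " acc.2.1], ([] : List String), acc.2.2)
        else acc
    | none => acc
  (acc'.1, acc'.2.1 ++ [x.1], some x.2.2.1)

-- A's trailing 'if current_line: formatted_text.append(...)'
def pvFinishA (st : List String × List String × Option Int) : List String :=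
  if st.2.1.isEmpty then st.1 else st.1 ++ [PySem.Str.join " " st.2.1]

def format_text_for_invoice (text_lines : List (String × Int × Int × Int × Int)) : String :=
  PySem.Str.join "\n" (pvFinishA
    ((PySem.List.sorted2 text_lines (fun x => x.2.2.1) (fun x => x.2.1)).foldl pvStepA ([], [], none)))

-- ===== PORT B =====
def format_text_for_invoice_alt (text_lines : List (String × Int × Int × Int × Int)) : String :=
  let s := PySem.List.sorted2 text_lines (fun x => x.2.2.1) (fun x => x.2.1)
  let texts := s.map (fun x => x.1)
  let tops := s.map (fun x => x.2.2.1)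
  let seps := (tops.zip tops.tail).map (fun p => if |p.2 - p.1| > 20 then "\n" else " ")
  PySem.Str.join "" (texts.take 1 ++ (seps.zip texts.tail).map (fun p => p.1 ++ p.2))

-- ===== PRECONDITION & SPEC =====
def Spec_format_text_for_invoice (text_lines : List (String × Int × Int × Int × Int)) (out : String) : Prop := out = format_text_for_invoice_alt text_lines
instance (text_lines : List (String × Int × Int × Int × Int)) (out : String) : Decidable (Spec_format_text_for_invoice text_lines out) := by unfold Spec_format_text_for_invoice; infer_instance

-- ===== CLAIM =====
def Claim_equal_format_text_for_invoice : Prop := ∀ (text_lines : List (String × Int × Int × Int × Int)), Dom_format_text_for_invoice text_lines → Spec_format_text_for_invoice text_lines (format_text_for_invoice text_lines)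

-- ===== LEMMAS AND PROOFS =====

-- proof-only intermediate: a stateful single string fold, bridging A's grouping fold and B's zips
def pvStepB (acc : String × Int) (x : String × Int × Int × Int × Int) : String × Int :=
  (acc.1 ++ (if |x.2.2.1 - acc.2| > 20 then "\n" else " ") ++ x.1, x.2.2.1)

-- proof-only: the pieces after the head, each separator already attached
def pvG (lt : Int) : List (String × Int × Int × Int × Int) → List String
  | [] => []
  | x :: t => ((if |x.2.2.1 - lt| > 20 then "\n" else " ") ++ x.1) :: pvG x.2.2.1 t

theorem chars_join_append_singleton (sep : List Char) (l : List (List Char)) (x : List Char) :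
    PySem.Chars.join sep (l ++ [x])
      = PySem.Chars.join sep l ++ (if l.isEmpty then [] else sep) ++ x := by
  induction l with
  | nil => simp [PySem.Chars.join_singleton, PySem.Chars.join_nil]
  | cons a l ih =>
      cases l with
      | nil =>
          simp [PySem.Chars.join_cons_cons, PySem.Chars.join_singleton]
      | cons b l =>
          simp only [List.cons_append] at ih ⊢
          simp only [PySem.Chars.join_cons_cons]
          rw [ih]
          simp

theorem str_join_append_singleton (sep : String) (l : List String) (x : String) (h : l ≠ []) :
    PySem.Str.join sep (l ++ [x]) = PySem.Str.join sep l ++ sep ++ x := by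
  rw [← String.toList_inj]
  simp [PySem.Str.toList_join, chars_join_append_singleton, h]

theorem str_join_append_singleton_append (sep : String) (l : List String) (a b : String) :
    PySem.Str.join sep (l ++ [a ++ b]) = PySem.Str.join sep (l ++ [a]) ++ b := by
  rw [← String.toList_inj]
  simp [PySem.Str.toList_join, chars_join_append_singleton]

theorem str_join_empty_cons (a : String) (l : List String) :
    PySem.Str.join "" (a :: l) = a ++ PySem.Str.join "" l := by
  cases l with
  | nil =>
      rw [← String.toList_inj]
      simp [PySem.Str.toList_join, PySem.Chars.join_singleton, PySem.Chars.join_nil]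
  | cons b l =>
      rw [← String.toList_inj]
      simp [PySem.Str.toList_join, PySem.Chars.join_cons_cons]

-- A's fold equals the stateful string fold (invariant on the running group)
theorem pv_inv (t : List (String × Int × Int × Int × Int)) :
    ∀ (ft cl : List String) (lt : Int), cl ≠ [] →
      PySem.Str.join "\n" (pvFinishA (t.foldl pvStepA (ft, cl, some lt)))
        = (t.foldl pvStepB
            (PySem.Str.join "\n" (ft ++ [PySem.Str.join " " cl]), lt)).1 := by
  induction t with
  | nil =>
      intro ft cl lt h
      simp [pvFinishA, List.isEmpty_iff, h]
  | cons x t ih =>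
      intro ft cl lt h
      by_cases hg : |x.2.2.1 - lt| > 20
      · have hA : pvStepA (ft, cl, some lt) x
            = (ft ++ [PySem.Str.join " " cl], [x.1], some x.2.2.1) := by
          simp [pvStepA, hg]
        have hB : pvStepB (PySem.Str.join "\n" (ft ++ [PySem.Str.join " " cl]), lt) x
            = (PySem.Str.join "\n" (ft ++ [PySem.Str.join " " cl]) ++ "\n" ++ x.1, x.2.2.1) := by
          simp [pvStepB, hg]
        rw [List.foldl_cons, hA, List.foldl_cons, hB,
          ih (ft ++ [PySem.Str.join " " cl]) [x.1] x.2.2.1 (by simp)]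
        rw [str_join_append_singleton "\n" (ft ++ [PySem.Str.join " " cl]) _ (by simp)]
        have : PySem.Str.join " " [x.1] = x.1 := by
          rw [← String.toList_inj]; simp [PySem.Str.toList_join, PySem.Chars.join_singleton]
        rw [this]
      · have hA : pvStepA (ft, cl, some lt) x = (ft, cl ++ [x.1], some x.2.2.1) := by
          simp [pvStepA, hg]
        have hB : pvStepB (PySem.Str.join "\n" (ft ++ [PySem.Str.join " " cl]), lt) x
            = (PySem.Str.join "\n" (ft ++ [PySem.Str.join " " cl]) ++ " " ++ x.1, x.2.2.1) := by
          simp [pvStepB, hg]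
        rw [List.foldl_cons, hA, List.foldl_cons, hB,
          ih ft (cl ++ [x.1]) x.2.2.1 (by simp)]
        rw [str_join_append_singleton " " cl x.1 h,
          str_join_append_singleton_append "\n" ft (PySem.Str.join " " cl ++ " ") x.1,
          str_join_append_singleton_append "\n" ft (PySem.Str.join " " cl) " "]

-- the stateful string fold, written out: r followed by the joined separator-attached pieces
theorem pv_fold_pieces (t : List (String × Int × Int × Int × Int)) :
    ∀ (r : String) (lt : Int),
      (t.foldl pvStepB (r, lt)).1 = r ++ PySem.Str.join "" (pvG lt t) := by
  induction t with
  | nil =>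
      intro r lt
      rw [← String.toList_inj]
      simp [PySem.Str.toList_join, pvG, PySem.Chars.join_nil]
  | cons x t ih =>
      intro r lt
      rw [List.foldl_cons]
      show (t.foldl pvStepB (r ++ (if |x.2.2.1 - lt| > 20 then "\n" else " ") ++ x.1, x.2.2.1)).1 = _
      rw [ih, pvG, str_join_empty_cons]
      rw [← String.toList_inj]; simp

-- B's zip construction after the head equals the separator-attached pieces
theorem pv_zip_pieces (t : List (String × Int × Int × Int × Int)) (a : Int) :
    ((((a :: t.map (fun y => y.2.2.1)).zip (t.map (fun y => y.2.2.1))).map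
        (fun p => if |p.2 - p.1| > 20 then "\n" else " ")).zip
      (t.map (fun y => y.1))).map (fun p => p.1 ++ p.2) = pvG a t := by
  induction t generalizing a with
  | nil => simp [pvG]
  | cons y t ih =>
      simp only [List.map_cons, List.zip_cons_cons, pvG]
      rw [← ih y.2.2.1]

-- ===== VERDICT =====
theorem format_text_for_invoice_spec : Claim_equal_format_text_for_invoice := by
  intro text_lines _
  unfold Spec_format_text_for_invoice format_text_for_invoice format_text_for_invoice_alt
  cases hs : PySem.List.sorted2 text_lines (fun x => x.2.2.1) (fun x => x.2.1) with
  | nil =>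
      simp [pvFinishA, PySem.Str.join]
  | cons h t =>
      show PySem.Str.join "\n" (pvFinishA ((h :: t).foldl pvStepA ([], [], none)))
        = PySem.Str.join "" (((h :: t).map (fun x => x.1)).take 1 ++
            (((((h :: t).map (fun x => x.2.2.1)).zip ((h :: t).map (fun x => x.2.2.1)).tail).map
                (fun p => if |p.2 - p.1| > 20 then "\n" else " ")).zip
              ((h :: t).map (fun x => x.1)).tail).map (fun p => p.1 ++ p.2))
      have hA : pvStepA ([], [], none) h = ([], [h.1], some h.2.2.1) := by
        simp [pvStepA]
      rw [List.foldl_cons, hA, pv_inv t [] [h.1] h.2.2.1 (by simp), pv_fold_pieces]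
      have hj : PySem.Str.join "\n" ([] ++ [PySem.Str.join " " [h.1]]) = h.1 := by
        rw [← String.toList_inj]; simp [PySem.Str.toList_join, PySem.Chars.join_singleton]
      rw [hj]
      simp only [List.map_cons, List.tail_cons, List.take_succ_cons, List.take_zero]
      rw [pv_zip_pieces t h.2.2.1, List.singleton_append, str_join_empty_cons]
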